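-- pv_equiv track=rewrite | github.com/struggling-student/PythonExercises | PythonExercises/Stringhe/20/solution.py | es20
-- ===== SOURCE A (Python) =====
-- def es20(stringa1):
--     alf='abcdefghilmnopqrstuvz'
--     d={alf[i]:i+1 for i in range(len(alf))}
--     stringa=''
--     n=0
--     stringa1=stringa1.lower()
--     for x in stringa1:
--         if x in d:
--             n+=d[x]
--         else:
--             if n !=0:
--                 stringa=stringa+str(n)
--                 stringa=stringa+' '
--                 n=0
--     if n !=0:
--         stringa=stringa+str(n)
--     return stringa
-- ===== SOURCE B (Python) =====
-- def es20(stringa1):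
--     alf = 'abcdefghilmnopqrstuvz'
--     d = {c: i + 1 for i, c in enumerate(alf)}
--     s = stringa1.lower()
--     norm = ''.join(c if c in d else ' ' for c in s)
--     *init, last = norm.split(' ')
--     out = []
--     for p in init:
--         if p:
--             out.append(str(sum(d[c] for c in p)) + ' ')
--     if last:
--         out.append(str(sum(d[c] for c in last)))
--     return ''.join(out)
-- ===== Notes on version B (the rewrite author's own statement) =====
-- stated objective: alternative
-- what changed: Replaces A's single streaming pass that emits each word sum at a letter/non-letter boundary with a tokenize-then-map-then-join decomposition: lowercase, translate non-alphabet characters to a space, split on the space character, sum each piece, and append a separator to every piece but the final one.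
import Mathlib
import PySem

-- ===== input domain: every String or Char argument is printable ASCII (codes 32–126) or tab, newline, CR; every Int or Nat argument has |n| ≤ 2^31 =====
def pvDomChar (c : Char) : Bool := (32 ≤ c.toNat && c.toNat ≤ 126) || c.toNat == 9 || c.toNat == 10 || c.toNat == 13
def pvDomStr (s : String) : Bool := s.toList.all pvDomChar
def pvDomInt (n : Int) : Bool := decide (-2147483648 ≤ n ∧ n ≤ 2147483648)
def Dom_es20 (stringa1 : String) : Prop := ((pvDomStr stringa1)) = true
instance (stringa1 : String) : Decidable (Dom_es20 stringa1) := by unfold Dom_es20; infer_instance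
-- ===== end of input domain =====

-- B replaces A's streaming emit-at-each-boundary pass by tokenize (normalize + split) / map / join; same values, no speed claim.

-- ===== PORT A =====
def es20 (stringa1 : String) : String :=
  let alf : List Char := "abcdefghilmnopqrstuvz".toList
  -- d = {alf[i]: i+1 for i in range(len(alf))}; alf[i] is always in range, so the getD default is never used
  let d : PySem.Dict Char Int :=
    (PySem.List.pyRange 0 (alf.length : Int) 1).foldl
      (fun dd i => dd.insert ((PySem.List.pyGet? alf i).getD ' ') (i + 1)) PySem.Dict.empty
  -- the loop: state (stringa, n); d[x] read with getD, guarded by the contains test as in Python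
  let r := (PySem.Str.lower stringa1).toList.foldl
      (fun st x =>
        if d.contains x then (st.1, st.2 + d.getD x 0)
        else if st.2 ≠ 0 then (st.1 ++ PySem.Int.toChars st.2 ++ [' '], (0 : Int)) else st)
      (([] : List Char), (0 : Int))
  String.ofList (if r.2 ≠ 0 then r.1 ++ PySem.Int.toChars r.2 else r.1)

-- ===== PORT B =====
def es20_alt (stringa1 : String) : String :=
  let alf : List Char := "abcdefghilmnopqrstuvz".toList
  let d : PySem.Dict Char Int :=
    (PySem.List.enumerate alf).foldl (fun dd p => dd.insert p.2 (p.1 + 1)) PySem.Dict.empty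
  let s := (PySem.Str.lower stringa1).toList
  let norm := s.map (fun c => if d.contains c then c else ' ')
  let pieces := PySem.Chars.splitOn norm [' ']
  -- *init, last = pieces  (split(' ') always returns at least one piece)
  let init := pieces.dropLast
  let last := (pieces.getLast?).getD []
  let wsum := fun (p : List Char) => p.foldl (fun n c => n + d.getD c 0) (0 : Int)
  let out := init.foldl
      (fun acc p => if p ≠ [] then acc ++ [PySem.Int.toChars (wsum p) ++ [' ']] else acc)
      ([] : List (List Char))
  let out := if last ≠ [] then out ++ [PySem.Int.toChars (wsum last)] else out
  String.ofList (PySem.Chars.join [] out)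

-- ===== PRECONDITION & SPEC =====
def Spec_es20 (stringa1 : String) (out : String) : Prop := out = es20_alt stringa1
instance (stringa1 : String) (out : String) : Decidable (Spec_es20 stringa1 out) := by unfold Spec_es20; infer_instance

-- ===== CLAIM (what is proved, stated in full; the proofs are below) =====
def Claim_equal_es20 : Prop := ∀ (stringa1 : String), Dom_es20 stringa1 → Spec_es20 stringa1 (es20 stringa1)

-- ===== LEMMAS AND PROOFS =====

def pvD : PySem.Dict Char Int :=
  (PySem.List.enumerate "abcdefghilmnopqrstuvz".toList).foldl
    (fun dd p => dd.insert p.2 (p.1 + 1)) PySem.Dict.empty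

theorem pv_dA_eq :
    ((PySem.List.pyRange 0 (("abcdefghilmnopqrstuvz".toList).length : Int) 1).foldl
      (fun dd i => dd.insert ((PySem.List.pyGet? "abcdefghilmnopqrstuvz".toList i).getD ' ') (i + 1))
      PySem.Dict.empty) = pvD := by decide

def pvV (c : Char) : Int := pvD.getD c 0
def pvM (c : Char) : Bool := pvD.contains c
def pvSum (p : List Char) : Int := p.foldl (fun n c => n + pvV c) 0

theorem pvM_space : pvM ' ' = false := by decide

theorem pvV_pos (c : Char) (h : pvM c = true) : 1 ≤ pvV c := by
  have e : pvD = PySem.Dict.mk [('a',1),('b',2),('c',3),('d',4),('e',5),('f',6),('g',7),('h',8),('i',9),('l',10),('m',11),('n',12),('o',13),('p',14),('q',15),('r',16),('s',17),('t',18),('u',19),('v',20),('z',21)] := by decide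
  unfold pvM pvV at *
  rw [e] at h ⊢
  simp [PySem.Dict.contains_mk] at h
  rcases h with h|h|h|h|h|h|h|h|h|h|h|h|h|h|h|h|h|h|h|h|h <;> subst h <;> decide

-- the common intermediate shape: A's streaming pass, written as structural recursion
def pvG : Int → List Char → List Char
  | n, [] => if n ≠ 0 then PySem.Int.toChars n else []
  | n, c :: t =>
      if pvM c then pvG (n + pvV c) t
      else (if n ≠ 0 then PySem.Int.toChars n ++ [' '] else []) ++ pvG 0 t

-- Python's s.split(' ') as plain structural recursion
def pvSplit : List Char → List Char → List (List Char)
  | [], cur => [cur.reverse]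
  | c :: t, cur => if c = ' ' then cur.reverse :: pvSplit t [] else pvSplit t (c :: cur)

def pvRend : List (List Char) → List Char
  | [] => []
  | [p] => if p ≠ [] then PySem.Int.toChars (pvSum p) else []
  | p :: rest => (if p ≠ [] then PySem.Int.toChars (pvSum p) ++ [' '] else []) ++ pvRend rest

def pvRendA : Int → List (List Char) → List Char
  | _, [] => []
  | n, [p] => if n + pvSum p ≠ 0 then PySem.Int.toChars (n + pvSum p) else []
  | n, p :: rest =>
      (if n + pvSum p ≠ 0 then PySem.Int.toChars (n + pvSum p) ++ [' '] else []) ++ pvRend rest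

theorem pv_go_eq (fuel : Nat) (l cur : List Char) (acc : List (List Char)) (h : l.length ≤ fuel) :
    PySem.Chars.splitOn.go [' '] fuel l cur acc = acc.reverse ++ pvSplit l cur := by
  induction fuel generalizing l cur acc with
  | zero =>
    have : l = [] := by cases l <;> simp_all
    subst this; simp [PySem.Chars.splitOn.go, pvSplit]
  | succ f ih =>
    cases l with
    | nil => simp [PySem.Chars.splitOn.go, pvSplit]
    | cons c t =>
      rw [PySem.Chars.splitOn.go]
      simp only [List.length_cons, Nat.succ_le_succ_iff] at h
      by_cases hc : c = ' '
      · subst hc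
        simp only [List.isPrefixOf, BEq.rfl, Bool.true_and, if_pos]
        rw [ih _ _ _ (by simpa using h)]
        simp [pvSplit]
      · have : [' '].isPrefixOf (c :: t) = false := by
          simp [List.isPrefixOf]; exact fun hh => (hc hh.symm).elim
        rw [if_neg (by simp [this])]
        rw [ih _ _ _ h]
        simp [pvSplit, hc]

theorem pv_splitOn_eq (l : List Char) : PySem.Chars.splitOn l [' '] = pvSplit l [] := by
  rw [PySem.Chars.splitOn, pv_go_eq _ _ _ _ (by omega)]; simp

theorem pvSplit_ne_nil (t cur : List Char) : pvSplit t cur ≠ [] := by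
  induction t generalizing cur with
  | nil => simp [pvSplit]
  | cons c r ih => simp only [pvSplit]; split <;> simp [ih]

theorem pvSplit_cur (t : List Char) : ∀ cur, ∃ p ps,
    pvSplit t [] = p :: ps ∧ pvSplit t cur = (cur.reverse ++ p) :: ps := by
  induction t with
  | nil => intro cur; exact ⟨[], [], by simp [pvSplit], by simp [pvSplit]⟩
  | cons c r ih =>
    intro cur
    by_cases hc : c = ' '
    · subst hc
      exact ⟨[], pvSplit r [], by simp [pvSplit], by simp [pvSplit]⟩
    · obtain ⟨p, ps, h1, h2⟩ := ih [c]
      obtain ⟨p', ps', h1', h2'⟩ := ih (c :: cur)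
      rw [h1] at h1'
      injection h1' with e1 e2
      subst e1; subst e2
      refine ⟨c :: p, ps, ?_, ?_⟩
      · simp only [pvSplit, if_neg hc]
        simpa using h2
      · simp only [pvSplit, if_neg hc]
        rw [h2']
        simp

theorem pvSum_shift (l : List Char) : ∀ n : Int,
    l.foldl (fun a c => a + pvV c) n = n + pvSum l := by
  induction l with
  | nil => intro n; simp [pvSum]
  | cons c t ih =>
    intro n
    simp only [pvSum, List.foldl_cons] at *
    rw [ih (n + pvV c), ih (0 + pvV c)]; ring_nf

theorem pvSum_cons (c : Char) (p : List Char) : pvSum (c :: p) = pvV c + pvSum p := by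
  simp only [pvSum, List.foldl_cons]; rw [pvSum_shift]; simp [pvSum]

theorem pvSum_nonneg (p : List Char) (h : ∀ c ∈ p, pvM c = true) : 0 ≤ pvSum p := by
  induction p with
  | nil => simp [pvSum]
  | cons c t ih =>
    rw [pvSum_cons]
    have h1 := pvV_pos c (h c (by simp))
    have h2 := ih (fun c hc => h c (by simp [hc]))
    omega

theorem pvSum_ne_zero (p : List Char) (h : ∀ c ∈ p, pvM c = true) :
    (pvSum p ≠ 0) ↔ p ≠ [] := by
  cases p with
  | nil => simp [pvSum]
  | cons c t =>
    simp only [ne_eq, reduceCtorEq, not_false_eq_true, iff_true]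
    rw [pvSum_cons]
    have h1 := pvV_pos c (h c (by simp))
    have h2 := pvSum_nonneg t (fun c hc => h c (by simp [hc]))
    omega

theorem pvSplit_mem (t : List Char) : ∀ cur, (∀ c ∈ t, c = ' ' ∨ pvM c = true) →
    (∀ c ∈ cur, pvM c = true) → ∀ p ∈ pvSplit t cur, ∀ c ∈ p, pvM c = true := by
  induction t with
  | nil =>
    intro cur _ hcur p hp c hc
    simp [pvSplit] at hp; subst hp
    exact hcur c (by simpa using hc)
  | cons a r ih =>
    intro cur ht hcur p hp c hc
    by_cases ha : a = ' '
    · subst ha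
      simp [pvSplit] at hp
      rcases hp with hp | hp
      · subst hp; exact hcur c (by simpa using hc)
      · exact ih [] (fun x hx => ht x (by simp [hx])) (by simp) p hp c hc
    · simp [pvSplit, ha] at hp
      have hma : pvM a = true := by
        rcases ht a (by simp) with h | h
        · exact absurd h ha
        · exact h
      refine ih (a :: cur) (fun x hx => ht x (by simp [hx])) ?_ p hp c hc
      intro x hx
      rcases List.mem_cons.mp hx with rfl | hx
      · exact hma
      · exact hcur x hx

theorem pvRendA_zero (ps : List (List Char)) (h : ∀ p ∈ ps, ∀ c ∈ p, pvM c = true) :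
    pvRendA 0 ps = pvRend ps := by
  cases ps with
  | nil => rfl
  | cons p rest =>
    cases rest with
    | nil =>
      simp only [pvRendA, pvRend, zero_add]
      simp only [pvSum_ne_zero p (h p (by simp))]
    | cons q qs =>
      simp only [pvRendA, pvRend, zero_add]
      simp only [pvSum_ne_zero p (h p (by simp))]

theorem pv_norm_mem (l : List Char) :
    ∀ p ∈ pvSplit (l.map (fun c => if pvM c then c else ' ')) [], ∀ c ∈ p, pvM c = true := by
  refine pvSplit_mem _ [] ?_ (by simp)
  intro x hx
  simp only [List.mem_map] at hx
  obtain ⟨y, -, hy⟩ := hx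
  subst hy
  by_cases h : pvM y = true <;> simp [h]

theorem pv_main (l : List Char) : ∀ n : Int, 0 ≤ n →
    pvG n l = pvRendA n (pvSplit (l.map (fun c => if pvM c then c else ' ')) []) := by
  induction l with
  | nil =>
    intro n _
    simp [pvG, pvSplit, pvRendA, pvSum]
  | cons c l ih =>
    intro n hn
    by_cases hm : pvM c = true
    · have hc : c ≠ ' ' := fun e => by rw [e, pvM_space] at hm; exact absurd hm (by simp)
      obtain ⟨p, ps, h1, h2⟩ := pvSplit_cur (l.map (fun c => if pvM c then c else ' ')) [c]
      have hv := pvV_pos c hm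
      simp only [List.map_cons, if_pos hm, pvSplit, if_neg hc]
      rw [h2]
      simp only [List.reverse_cons, List.reverse_nil, List.nil_append, List.cons_append,
        List.nil_append]
      simp only [pvG, if_pos hm]
      rw [ih (n + pvV c) (by omega), h1]
      cases ps with
      | nil => simp only [pvRendA, pvSum_cons, add_assoc]
      | cons q qs => simp only [pvRendA, pvSum_cons, add_assoc]
    · have hsp : pvSplit (' ' :: l.map (fun c => if pvM c then c else ' ')) []
          = [] :: pvSplit (l.map (fun c => if pvM c then c else ' ')) [] := by
        simp [pvSplit]
      simp only [List.map_cons, if_neg hm]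
      rw [hsp]
      simp only [pvG, hm, Bool.false_eq_true, if_false]
      rw [ih 0 le_rfl]
      have hne := pvSplit_ne_nil (l.map (fun c => if pvM c then c else ' ')) []
      obtain ⟨q, qs, hq⟩ : ∃ q qs, pvSplit (l.map (fun c => if pvM c then c else ' ')) [] = q :: qs := by
        cases hqq : pvSplit (l.map (fun c => if pvM c then c else ' ')) [] with
        | nil => exact absurd hqq hne
        | cons q qs => exact ⟨q, qs, rfl⟩
      rw [hq]
      have hmem : ∀ p ∈ q :: qs, ∀ c ∈ p, pvM c = true := by
        rw [← hq]; exact pv_norm_mem l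
      rw [pvRendA_zero _ hmem]
      simp only [pvRendA, pvSum, List.foldl_nil, add_zero]

-- A-side: the fold plus the final flush computes pvG
theorem pv_foldA (l : List Char) : ∀ (st : List Char) (n : Int),
    (let r := l.foldl
        (fun st x =>
          if pvD.contains x then (st.1, st.2 + pvD.getD x 0)
          else if st.2 ≠ 0 then (st.1 ++ PySem.Int.toChars st.2 ++ [' '], (0 : Int)) else st)
        (st, n);
      if r.2 ≠ 0 then r.1 ++ PySem.Int.toChars r.2 else r.1) = st ++ pvG n l := by
  induction l with
  | nil =>
    intro st n
    simp only [List.foldl_nil, pvG]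
    split <;> simp
  | cons c t ih =>
    intro st n
    simp only [List.foldl_cons]
    by_cases hm : pvD.contains c = true
    · rw [if_pos hm]
      have := ih st (n + pvD.getD c 0)
      simp only at this ⊢
      rw [this]
      simp [pvG, pvM, hm, pvV]
    · rw [if_neg hm]
      by_cases hz : n ≠ 0
      · rw [if_pos hz]
        have := ih (st ++ PySem.Int.toChars n ++ [' ']) 0
        simp only at this ⊢
        rw [this]
        simp [pvG, pvM, hm, hz]
      · rw [if_neg hz]
        have := ih st n
        simp only at this ⊢
        rw [this]
        simp only [ne_eq, not_not] at hz
        simp [pvG, pvM, hm, hz]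

-- B-side: foldl over the initial pieces shifts over the accumulator
theorem pv_foldB_shift (l : List (List Char)) : ∀ acc : List (List Char),
    l.foldl (fun acc p => if p ≠ [] then acc ++ [PySem.Int.toChars (pvSum p) ++ [' ']] else acc) acc
      = acc ++ l.foldl (fun acc p => if p ≠ [] then acc ++ [PySem.Int.toChars (pvSum p) ++ [' ']] else acc) [] := by
  induction l with
  | nil => intro acc; simp
  | cons p t ih =>
    intro acc
    simp only [List.foldl_cons]
    by_cases hp : p ≠ []
    · rw [if_pos hp, if_pos hp, ih (acc ++ _), ih ([] ++ _)]; simp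
    · rw [if_neg hp, if_neg hp]; exact ih acc

theorem pv_intercalate_nil (xs : List (List Char)) : List.intercalate [] xs = xs.flatten := by
  induction xs with
  | nil => simp [List.intercalate]
  | cons a t ih => cases t <;> simp_all [List.intercalate, List.intersperse]

theorem pv_rendB (ps : List (List Char)) (hne : ps ≠ []) :
    PySem.Chars.join []
      (let out := ps.dropLast.foldl
          (fun acc p => if p ≠ [] then acc ++ [PySem.Int.toChars (pvSum p) ++ [' ']] else acc) [];
        if (ps.getLast?).getD [] ≠ [] then out ++ [PySem.Int.toChars (pvSum ((ps.getLast?).getD []))] else out)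
      = pvRend ps := by
  have jf : ∀ xs : List (List Char), PySem.Chars.join [] xs = xs.flatten := fun xs => by
    simp [PySem.Chars.join, pv_intercalate_nil]
  induction ps with
  | nil => exact absurd rfl hne
  | cons p rest ih =>
    cases rest with
    | nil =>
      by_cases hp : p = []
      · subst hp; simp [jf, pvRend]
      · simp [jf, pvRend, hp]
    | cons q qs =>
      have ihh := ih (by simp)
      simp only [] at ihh
      have hd : (p :: q :: qs).dropLast = p :: (q :: qs).dropLast := by simp
      have hl : (p :: q :: qs).getLast? = (q :: qs).getLast? := List.getLast?_cons_cons
      simp only [hd, hl, List.foldl_cons]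
      have hrend : pvRend (p :: q :: qs)
          = (if p ≠ [] then PySem.Int.toChars (pvSum p) ++ [' '] else []) ++ pvRend (q :: qs) := by
        simp [pvRend]
      by_cases hp : p = []
      · subst hp
        rw [if_neg (fun h : ([] : List Char) ≠ [] => h rfl)]
        rw [ihh, hrend]
        simp
      · rw [if_pos hp, List.nil_append, pv_foldB_shift]
        by_cases hl2 : (q :: qs).getLast?.getD [] ≠ []
        · rw [if_pos hl2] at ihh ⊢
          rw [jf] at ihh ⊢
          simp only [List.flatten_append] at ihh ⊢
          rw [hrend, if_pos hp, ← ihh]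
          simp
        · rw [if_neg hl2] at ihh ⊢
          rw [jf] at ihh ⊢
          simp only [List.flatten_append] at ihh ⊢
          rw [hrend, if_pos hp, ← ihh]
          simp

-- ===== VERDICT (by name: the statement is the Claim_ definition above) =====
theorem es20_spec : Claim_equal_es20 := by
  intro s _
  unfold Spec_es20 es20 es20_alt
  simp only []
  rw [pv_dA_eq]
  have hdB : ((PySem.List.enumerate "abcdefghilmnopqrstuvz".toList).foldl
      (fun dd p => dd.insert p.2 (p.1 + 1)) PySem.Dict.empty) = pvD := rfl
  rw [hdB]
  have hA := pv_foldA (PySem.Str.lower s).toList [] 0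
  simp only [] at hA
  rw [hA, List.nil_append]
  have hfun : ∀ c : Char, (if pvD.contains c then c else ' ') = (if pvM c then c else ' ') :=
    fun _ => rfl
  simp only [hfun]
  have hsum : ∀ p : List Char, List.foldl (fun (n : Int) c => n + pvD.getD c 0) 0 p = pvSum p :=
    fun _ => rfl
  simp only [hsum]
  rw [pv_splitOn_eq]
  have hB := pv_rendB
      (pvSplit (((PySem.Str.lower s).toList).map (fun c => if pvM c then c else ' ')) [])
      (pvSplit_ne_nil _ _)
  simp only [] at hB
  rw [hB]
  rw [pv_main (PySem.Str.lower s).toList 0 le_rfl,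
      pvRendA_zero _ (pv_norm_mem (PySem.Str.lower s).toList)]
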